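-- pv_equiv track=rewrite | github.com/logos914/INTRO-PROGRA-Resueltos | practica-4/ej6.py | gritar
-- ===== SOURCE A (Python) =====
-- def exclamar(unaCadena):
--
--     #Exclamar consiste en concatenar a la cadena origna, los signos de admiración adelante y atras
--     cadenaConExclamacion = "¡" + unaCadena + "!"
--
--     # Una vez que tengo la frase con la exclamación la devuelvo
--     return cadenaConExclamacion
--
-- def gritar(unaCadena):
--
--     #Necesito exclamar la cadena 3 veces antes de retornarla, tengo varias maneras de hacerlo
--
--     # Opción 1, muy repetitiva
--     nuevaCadena = exclamar(unaCadena)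
--     nuevaCadena = exclamar(nuevaCadena)
--     nuevaCadena = exclamar(nuevaCadena)
--
--
--     # Opción 2, metiendo el resultado de exclamar, dentro de otra exclamar, así 3 veces. Muy confusa de escribir y leer
--     nuevaCadena  = exclamar(exclamar(exclamar(nuevaCadena)))
--
--     # Opción 3, buclear
--     nuevaCadena = unaCadena
--     for i in range(3):
--         nuevaCadena = exclamar(nuevaCadena)
--
--     return nuevaCadena
-- ===== SOURCE B (Python) =====
-- def gritar(unaCadena):
--     return "¡¡¡" + unaCadena + "!!!"
-- ===== Notes on version B (the rewrite author's own statement) =====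
-- stated objective: simpler
-- what changed: Replaces the exclamar helper and the repeated/looped three-fold application with one closed-form concatenation of the three-mark prefix and suffix.
import Mathlib
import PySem

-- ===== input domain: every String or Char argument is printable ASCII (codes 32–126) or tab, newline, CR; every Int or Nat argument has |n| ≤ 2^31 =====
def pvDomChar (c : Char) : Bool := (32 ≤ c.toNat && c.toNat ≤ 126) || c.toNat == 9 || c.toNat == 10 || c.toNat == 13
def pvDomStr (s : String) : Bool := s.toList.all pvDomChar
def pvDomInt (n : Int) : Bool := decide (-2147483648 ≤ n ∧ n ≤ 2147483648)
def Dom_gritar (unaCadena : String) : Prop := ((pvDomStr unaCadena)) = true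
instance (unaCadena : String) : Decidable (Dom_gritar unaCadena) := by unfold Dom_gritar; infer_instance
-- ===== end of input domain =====

-- B replaces the exclamar helper and the three-iteration loop with one closed-form concatenation (simpler).


-- ===== PORT A =====
-- exclamar: "¡" + s + "!"  (ported over List Char; String concatenation is opaque to the kernel)
def exclamarA (s : List Char) : List Char := ['¡'] ++ s ++ ['!']

def gritar (unaCadena : String) : String :=
  -- Opción 1
  let n1 := exclamarA unaCadena.toList
  let n2 := exclamarA n1
  let n3 := exclamarA n2
  -- Opción 2
  let n4 := exclamarA (exclamarA (exclamarA n3))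
  -- Opción 3: nuevaCadena = unaCadena; for i in range(3): nuevaCadena = exclamar(nuevaCadena)
  let _ := n4
  let n5 := (PySem.List.pyRange 0 3 1).foldl (fun acc _ => exclamarA acc) unaCadena.toList
  String.mk n5

-- ===== PORT B =====
def gritar_alt (unaCadena : String) : String :=
  String.mk ('¡' :: '¡' :: '¡' :: unaCadena.toList ++ ['!', '!', '!'])

-- ===== PRECONDITION & SPEC =====
def Spec_gritar (unaCadena : String) (out : String) : Prop := out = gritar_alt unaCadena
instance (unaCadena : String) (out : String) : Decidable (Spec_gritar unaCadena out) := by unfold Spec_gritar; infer_instance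

-- ===== CLAIM (what is proved, stated in full; the proofs are below) =====
def Claim_equal_gritar : Prop := ∀ (unaCadena : String), Dom_gritar unaCadena → Spec_gritar unaCadena (gritar unaCadena)

-- ===== LEMMAS AND PROOFS =====

-- ===== VERDICT (by name: the statement is the Claim_ definition above) =====
theorem gritar_spec : Claim_equal_gritar := by
  intro s _
  show _ = _
  simp [gritar, gritar_alt, exclamarA, PySem.List.pyRange, List.range_succ]
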